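-- pv_equiv track=rewrite | github.com/Kirito0098/AdminAntizapret | app.py | _extract_status_payload_from_management
-- ===== SOURCE A (Python) =====
-- def _extract_status_payload_from_management(raw):
--     lines = []
--     for raw_line in (raw or "").splitlines():
--         line = raw_line.strip("\r")
--         if not line:
--             continue
--         if (
--             line.startswith("TITLE,")
--             or line.startswith("TIME,")
--             or line.startswith("HEADER,")
--             or line.startswith("TITLE\t")
--             or line.startswith("TIME\t")
--             or line.startswith("HEADER\t")
--             or line.startswith("TITLE ")
--             or line.startswith("TIME ")
--             or line.startswith("HEADER ")
--         ):
--             lines.append(line)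
--             continue
--         if (
--             line.startswith("CLIENT_LIST,")
--             or line.startswith("ROUTING_TABLE,")
--             or line.startswith("GLOBAL_STATS,")
--             or line.startswith("CLIENT_LIST\t")
--             or line.startswith("ROUTING_TABLE\t")
--             or line.startswith("GLOBAL_STATS\t")
--             or line.startswith("CLIENT_LIST ")
--             or line.startswith("ROUTING_TABLE ")
--             or line.startswith("GLOBAL_STATS ")
--         ):
--             lines.append(line)
--             continue
--         if line == "END":
--             lines.append(line)
--
--     return "\n".join(lines)
-- ===== SOURCE B (Python) =====
-- KEYWORDS = ("TITLE", "TIME", "HEADER", "CLIENT_LIST", "ROUTING_TABLE", "GLOBAL_STATS")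
--
--
-- def _has_keyword(line):
--     # scan to the first separator; keep iff the text before it is a keyword
--     for i, ch in enumerate(line):
--         if ch in ",\t ":
--             return line[:i] in KEYWORDS
--     return False
--
--
-- def _extract_status_payload_from_management(raw):
--     lines = [rl.strip("\r") for rl in (raw or "").splitlines()]
--     kept = [l for l in lines if l and (l == "END" or _has_keyword(l))]
--     return "\n".join(kept)
-- ===== Notes on version B (the rewrite author's own statement) =====
-- stated objective: idiomatic
-- what changed: Replaces the nine hard-coded keyword+separator startswith tests by a single scan to the line's first separator character followed by one membership test of the prefix in a keyword tuple.
import Mathlib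
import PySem

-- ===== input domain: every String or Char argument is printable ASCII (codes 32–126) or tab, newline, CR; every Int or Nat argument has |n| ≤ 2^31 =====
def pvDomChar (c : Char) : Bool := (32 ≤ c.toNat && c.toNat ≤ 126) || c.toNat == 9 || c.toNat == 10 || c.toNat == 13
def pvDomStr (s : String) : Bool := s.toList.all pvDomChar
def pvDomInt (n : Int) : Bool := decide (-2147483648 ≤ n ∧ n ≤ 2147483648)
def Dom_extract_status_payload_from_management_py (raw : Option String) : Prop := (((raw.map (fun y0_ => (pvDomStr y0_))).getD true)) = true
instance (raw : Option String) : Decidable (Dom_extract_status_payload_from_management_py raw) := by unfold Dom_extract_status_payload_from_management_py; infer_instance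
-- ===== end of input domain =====

set_option maxRecDepth 8192
set_option maxHeartbeats 2000000


-- B replaces A's nine hard-coded keyword+separator startswith tests per group by one scan to the
-- line's first separator character and a single membership test of the prefix (objective: idiomatic).

-- ===== PORT A =====
-- the two parenthesised if-conditions of A, as helper predicates
def pvG1 (line : String) : Bool :=
  PySem.Str.startswith line "TITLE," || PySem.Str.startswith line "TIME," ||
  PySem.Str.startswith line "HEADER," || PySem.Str.startswith line "TITLE\t" ||
  PySem.Str.startswith line "TIME\t" || PySem.Str.startswith line "HEADER\t" ||
  PySem.Str.startswith line "TITLE " || PySem.Str.startswith line "TIME " ||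
  PySem.Str.startswith line "HEADER "

def pvG2 (line : String) : Bool :=
  PySem.Str.startswith line "CLIENT_LIST," || PySem.Str.startswith line "ROUTING_TABLE," ||
  PySem.Str.startswith line "GLOBAL_STATS," || PySem.Str.startswith line "CLIENT_LIST\t" ||
  PySem.Str.startswith line "ROUTING_TABLE\t" || PySem.Str.startswith line "GLOBAL_STATS\t" ||
  PySem.Str.startswith line "CLIENT_LIST " || PySem.Str.startswith line "ROUTING_TABLE " ||
  PySem.Str.startswith line "GLOBAL_STATS "

-- A's loop body
def pvBodyA (lines : List String) (raw_line : String) : List String :=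
  let line := PySem.Str.stripChars raw_line "\r"
  if line == "" then lines
  else if pvG1 line then lines ++ [line]
  else if pvG2 line then lines ++ [line]
  else if line == "END" then lines ++ [line]
  else lines

def extract_status_payload_from_management_py (raw : Option String) : String :=
  let lines := (PySem.Str.splitlines (raw.getD "")).foldl pvBodyA []
  PySem.Str.join "\n" lines

-- ===== PORT B =====
-- strings handled as their char lists (the prefix line[:i] is built up while scanning)
def pvKeywords : List (List Char) :=
  ["TITLE".toList, "TIME".toList, "HEADER".toList,
   "CLIENT_LIST".toList, "ROUTING_TABLE".toList, "GLOBAL_STATS".toList]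

def pvIsSep (c : Char) : Bool := c == ',' || c == '\t' || c == ' '

def pvHasKeyword (pre : List Char) : List Char → Bool
  | [] => false
  | c :: rest => if pvIsSep c then pvKeywords.contains pre else pvHasKeyword (pre ++ [c]) rest

-- B's keep-this-line predicate
def pvPredB (l : String) : Bool := !(l == "") && (l == "END" || pvHasKeyword [] l.toList)

def extract_status_payload_from_management_py_alt (raw : Option String) : String :=
  let lines := (PySem.Str.splitlines (raw.getD "")).map (fun rl => PySem.Str.stripChars rl "\r")
  let kept := lines.filter pvPredB
  PySem.Str.join "\n" kept

-- ===== PRECONDITION & SPEC =====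
def Spec_extract_status_payload_from_management_py (raw : Option String) (out : String) : Prop := out = extract_status_payload_from_management_py_alt raw
instance (raw : Option String) (out : String) : Decidable (Spec_extract_status_payload_from_management_py raw out) := by unfold Spec_extract_status_payload_from_management_py; infer_instance

-- ===== CLAIM (what is proved, stated in full; the proofs are below) =====
def Claim_equal_extract_status_payload_from_management_py : Prop := ∀ (raw : Option String), Dom_extract_status_payload_from_management_py raw → Spec_extract_status_payload_from_management_py raw (extract_status_payload_from_management_py raw)

-- ===== LEMMAS AND PROOFS =====

theorem scan_iff (cs pre : List Char) :
    pvHasKeyword pre cs = true ↔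
      ∃ p c rest, cs = p ++ c :: rest ∧ (∀ a ∈ p, pvIsSep a = false) ∧ pvIsSep c = true ∧
        pvKeywords.contains (pre ++ p) = true := by
  induction cs generalizing pre with
  | nil => simp [pvHasKeyword]
  | cons c rest ih =>
    by_cases hs : pvIsSep c = true
    · simp only [pvHasKeyword, hs, if_true]
      constructor
      · intro h
        exact ⟨[], c, rest, by simp, by simp, hs, by simpa using h⟩
      · rintro ⟨p, c', r', heq, hns, hsep, hmem⟩
        cases p with
        | nil =>
          rw [List.nil_append] at heq
          injection heq with h1 h2
          simpa using hmem
        | cons a p' =>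
          rw [List.cons_append] at heq
          injection heq with h1 h2
          subst h1
          have hf := hns c (List.mem_cons_self ..)
          simp [hf] at hs
    · simp only [pvHasKeyword, if_neg hs]
      rw [Bool.not_eq_true] at hs
      rw [ih]
      constructor
      · rintro ⟨p, c', r', heq, hns, hsep, hmem⟩
        refine ⟨c :: p, c', r', by simp [heq], ?_, hsep, by simpa using hmem⟩
        intro a ha
        rcases List.mem_cons.mp ha with rfl | ha
        · exact hs
        · exact hns a ha
      · rintro ⟨p, c', r', heq, hns, hsep, hmem⟩
        cases p with
        | nil =>
          rw [List.nil_append] at heq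
          injection heq with h1 h2
          subst h1
          simp [hs] at hsep
        | cons a p' =>
          rw [List.cons_append] at heq
          injection heq with h1 h2
          subst h1
          exact ⟨p', c', r', h2, fun x hx => hns x (by simp [hx]), hsep, by simpa using hmem⟩

theorem sw_split (l pat : String) (kw : List Char) (c : Char)
    (hp : pat.toList = kw ++ [c]) (h : PySem.Str.startswith l pat = true) :
    ∃ rest, l.toList = kw ++ c :: rest := by
  have h' : pat.toList <+: l.toList := (PySem.Chars.startswith_iff l.toList pat.toList).mp (by simpa using h)
  obtain ⟨rest, hr⟩ := h'
  refine ⟨rest, ?_⟩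
  rw [← hr, hp, List.append_assoc]
  simp

theorem build_sw (l kw : List Char) (c : Char) (rest : List Char)
    (heq : l = kw ++ c :: rest) : PySem.Chars.startswith l (kw ++ [c]) = true := by
  refine (PySem.Chars.startswith_iff l (kw ++ [c])).mpr ⟨rest, by simp [heq]⟩

theorem fwd_case (l pat : String) (kw : List Char) (c : Char)
    (hp : pat.toList = kw ++ [c]) (hns : kw.all (fun a => !(pvIsSep a)) = true) (hc : pvIsSep c = true)
    (hmem : pvKeywords.contains kw = true)
    (h : PySem.Str.startswith l pat = true) : pvHasKeyword [] l.toList = true := by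
  obtain ⟨rest, hr⟩ := sw_split l pat kw c hp h
  rw [scan_iff]
  rw [List.all_eq_true] at hns
  exact ⟨kw, c, rest, hr, fun a ha => by simpa using hns a ha, hc, by simpa using hmem⟩

theorem key (l : String) : (pvG1 l || pvG2 l) = pvHasKeyword [] l.toList := by
  rw [Bool.eq_iff_iff]
  constructor
  · intro h
    simp only [pvG1, pvG2, Bool.or_eq_true, or_assoc] at h
    rcases h with h|h|h|h|h|h|h|h|h|h|h|h|h|h|h|h|h|h
    · exact fwd_case l "TITLE," "TITLE".toList ',' (by decide) (by decide) (by decide) (by decide) h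
    · exact fwd_case l "TIME," "TIME".toList ',' (by decide) (by decide) (by decide) (by decide) h
    · exact fwd_case l "HEADER," "HEADER".toList ',' (by decide) (by decide) (by decide) (by decide) h
    · exact fwd_case l "TITLE\t" "TITLE".toList '\t' (by decide) (by decide) (by decide) (by decide) h
    · exact fwd_case l "TIME\t" "TIME".toList '\t' (by decide) (by decide) (by decide) (by decide) h
    · exact fwd_case l "HEADER\t" "HEADER".toList '\t' (by decide) (by decide) (by decide) (by decide) h
    · exact fwd_case l "TITLE " "TITLE".toList ' ' (by decide) (by decide) (by decide) (by decide) h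
    · exact fwd_case l "TIME " "TIME".toList ' ' (by decide) (by decide) (by decide) (by decide) h
    · exact fwd_case l "HEADER " "HEADER".toList ' ' (by decide) (by decide) (by decide) (by decide) h
    · exact fwd_case l "CLIENT_LIST," "CLIENT_LIST".toList ',' (by decide) (by decide) (by decide) (by decide) h
    · exact fwd_case l "ROUTING_TABLE," "ROUTING_TABLE".toList ',' (by decide) (by decide) (by decide) (by decide) h
    · exact fwd_case l "GLOBAL_STATS," "GLOBAL_STATS".toList ',' (by decide) (by decide) (by decide) (by decide) h
    · exact fwd_case l "CLIENT_LIST\t" "CLIENT_LIST".toList '\t' (by decide) (by decide) (by decide) (by decide) h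
    · exact fwd_case l "ROUTING_TABLE\t" "ROUTING_TABLE".toList '\t' (by decide) (by decide) (by decide) (by decide) h
    · exact fwd_case l "GLOBAL_STATS\t" "GLOBAL_STATS".toList '\t' (by decide) (by decide) (by decide) (by decide) h
    · exact fwd_case l "CLIENT_LIST " "CLIENT_LIST".toList ' ' (by decide) (by decide) (by decide) (by decide) h
    · exact fwd_case l "ROUTING_TABLE " "ROUTING_TABLE".toList ' ' (by decide) (by decide) (by decide) (by decide) h
    · exact fwd_case l "GLOBAL_STATS " "GLOBAL_STATS".toList ' ' (by decide) (by decide) (by decide) (by decide) h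
  · intro h
    rw [scan_iff] at h
    obtain ⟨p, c, rest, heq, hns, hsep, hmem⟩ := h
    rw [List.nil_append] at hmem
    have hp : p ∈ pvKeywords := by simpa using hmem
    have hc : c = ',' ∨ c = '\t' ∨ c = ' ' := by
      have := hsep
      simp only [pvIsSep, Bool.or_eq_true, beq_iff_eq] at this
      tauto
    simp only [pvKeywords, List.mem_cons, List.not_mem_nil, or_false] at hp
    rcases hp with rfl|rfl|rfl|rfl|rfl|rfl <;> rcases hc with rfl|rfl|rfl <;>
      (have hsw := build_sw l.toList _ _ rest heq; simp at hsw; simp [pvG1, pvG2, hsw])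

theorem stepA (acc : List String) (rl : String) :
    pvBodyA acc rl =
      acc ++ (if pvPredB (PySem.Str.stripChars rl "\r") then [PySem.Str.stripChars rl "\r"] else []) := by
  have hk := key (PySem.Str.stripChars rl "\r")
  simp only [pvBodyA, pvPredB]
  by_cases h0 : (PySem.Str.stripChars rl "\r" == "") = true
  · simp [h0]
  · by_cases hg1 : pvG1 (PySem.Str.stripChars rl "\r") = true <;>
    by_cases hg2 : pvG2 (PySem.Str.stripChars rl "\r") = true <;>
    by_cases hE : (PySem.Str.stripChars rl "\r" == "END") = true <;>
    simp_all

theorem foldA (ls : List String) (acc : List String) :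
    ls.foldl pvBodyA acc =
      acc ++ (ls.map (fun rl => PySem.Str.stripChars rl "\r")).filter pvPredB := by
  induction ls generalizing acc with
  | nil => simp
  | cons rl t ih =>
    rw [List.foldl_cons, ih, stepA, List.map_cons, List.filter_cons]
    by_cases h : pvPredB (PySem.Str.stripChars rl "\r") = true <;> simp [h]

-- ===== VERDICT (by name: the statement is the Claim_ definition above) =====
theorem extract_status_payload_from_management_py_spec : Claim_equal_extract_status_payload_from_management_py := by
  intro raw _
  unfold Spec_extract_status_payload_from_management_py
  unfold extract_status_payload_from_management_py extract_status_payload_from_management_py_alt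
  rw [foldA, List.nil_append]
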